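-- pv_equiv track=rewrite | github.com/iceout/aidd-plugin | skills/aidd-rlm/runtime/rlm_verify.py | _validate_symbols
-- ===== SOURCE A (Python) =====
-- from collections.abc import Iterable
--
-- def _symbol_variants(symbol: str) -> list[str]:
--     symbol = symbol.strip()
--     if not symbol:
--         return []
--     variants = [symbol]
--     if "." in symbol:
--         variants.append(symbol.split(".")[-1])
--     if "::" in symbol:
--         variants.append(symbol.split("::")[-1])
--     return list(dict.fromkeys(variants))
--
-- def _contains_symbol(text: str, symbol: str) -> bool:
--     return symbol in text
--
-- def _validate_symbols(text: str, symbols: Iterable[str]) -> list[str]: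
--     missing: list[str] = []
--     for sym in symbols:
--         sym = str(sym).strip()
--         if not sym:
--             continue
--         variants = _symbol_variants(sym)
--         if not variants:
--             continue
--         if any(_contains_symbol(text, variant) for variant in variants):
--             continue
--         missing.append(sym)
--     return missing
-- ===== SOURCE B (Python) =====
-- # B: instead of building a per-symbol variant list, deduplicating it and testing each
-- # variant against the text, observe that every variant is a suffix of the symbol, so
-- # "some variant occurs in text" is equivalent to "the shortest variant occurs in text".
-- # B therefore performs a single substring test per symbol (same value on every input).
-- def _validate_symbols(text, symbols):
--     missing = []
--     for raw in symbols:
--         sym = str(raw).strip()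
--         if not sym:
--             continue
--         probe = sym.split(".")[-1] if "." in sym else sym
--         if "::" in sym:
--             t = sym.split("::")[-1]
--             if len(t) < len(probe):
--                 probe = t
--         if probe not in text:
--             missing.append(sym)
--     return missing
-- ===== Notes on version B (the rewrite author's own statement) =====
-- stated objective: alternative
-- what changed: Every variant A generates is a suffix of the symbol, so B replaces A's per-symbol variant list + dedup + any()-scan over the text by a single substring test of the shortest variant.
import Mathlib
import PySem

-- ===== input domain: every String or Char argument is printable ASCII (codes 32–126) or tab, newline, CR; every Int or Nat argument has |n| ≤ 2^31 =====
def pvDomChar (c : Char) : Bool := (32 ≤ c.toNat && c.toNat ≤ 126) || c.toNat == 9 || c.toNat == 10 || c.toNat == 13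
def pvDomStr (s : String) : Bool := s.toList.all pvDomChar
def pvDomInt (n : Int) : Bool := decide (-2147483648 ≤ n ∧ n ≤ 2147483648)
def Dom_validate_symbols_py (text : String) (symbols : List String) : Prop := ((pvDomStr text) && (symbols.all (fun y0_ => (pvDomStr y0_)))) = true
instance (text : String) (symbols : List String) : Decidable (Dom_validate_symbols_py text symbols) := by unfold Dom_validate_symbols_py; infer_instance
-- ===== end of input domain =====

-- B replaces A's per-symbol variant list + dedup + any-scan by a single substring test
-- of the shortest variant (every variant A generates is a suffix of the symbol).

-- shared helper for the Python expression `s.split(sep)[-1]` (both sources contain it);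
-- sep is a nonempty literal at every call site, so `split?` is `some` and `[-1]` never raises
def pySplitLast (s sep : String) : String :=
  (PySem.List.pyGet? ((PySem.Str.split? s sep).getD []) (-1)).getD ""

-- ===== PORT A =====
def symbolVariants (symbol : String) : List String :=
  let symbol := PySem.Str.strip symbol
  if symbol = "" then []
  else
    let variants := [symbol]
    let variants := if PySem.Str.isIn "." symbol then variants ++ [pySplitLast symbol "."] else variants
    let variants := if PySem.Str.isIn "::" symbol then variants ++ [pySplitLast symbol "::"] else variants
    PySem.List.dedup variants

def containsSymbol (text symbol : String) : Bool :=
  PySem.Str.isIn symbol text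

def validate_symbols_py (text : String) (symbols : List String) : List String :=
  symbols.foldl (fun missing sym0 =>
    let sym := PySem.Str.strip sym0
    if sym = "" then missing
    else
      let variants := symbolVariants sym
      if variants.isEmpty then missing
      else if variants.any (fun v => containsSymbol text v) then missing
      else missing ++ [sym]) []

-- ===== PORT B =====
def validate_symbols_py_alt (text : String) (symbols : List String) : List String :=
  symbols.foldl (fun missing raw =>
    let sym := PySem.Str.strip raw
    if sym = "" then missing
    else
      let probe := if PySem.Str.isIn "." sym then pySplitLast sym "." else sym
      let probe :=
        if PySem.Str.isIn "::" sym then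
          let t := pySplitLast sym "::"
          if PySem.Str.len t < PySem.Str.len probe then t else probe
        else probe
      if PySem.Str.isIn probe text then missing else missing ++ [sym]) []

-- ===== PRECONDITION & SPEC =====
def Spec_validate_symbols_py (text : String) (symbols : List String) (out : List String) : Prop := out = validate_symbols_py_alt text symbols
instance (text : String) (symbols : List String) (out : List String) : Decidable (Spec_validate_symbols_py text symbols out) := by unfold Spec_validate_symbols_py; infer_instance

-- ===== CLAIM (what is proved, stated in full; the proofs are below) =====
def Claim_equal_validate_symbols_py : Prop := ∀ (text : String) (symbols : List String), Dom_validate_symbols_py text symbols → Spec_validate_symbols_py text symbols (validate_symbols_py text symbols)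

-- ===== LEMMAS AND PROOFS =====

-- the final piece of splitOn.go is a suffix of any s that cur.reverse ++ l is a suffix of
theorem pv_go_spec (sep : List Char) :
    ∀ (fuel : Nat) (l cur : List Char) (acc : List (List Char)) (s : List Char),
      cur.reverse ++ l <:+ s →
      ∃ p acc', PySem.Chars.splitOn.go sep fuel l cur acc = (p :: acc').reverse ∧ p <:+ s := by
  intro fuel
  induction fuel with
  | zero =>
    intro l cur acc s h
    exact ⟨cur.reverse ++ l, acc, by simp [PySem.Chars.splitOn.go], h⟩
  | succ fuel ih =>
    intro l cur acc s h
    cases l with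
    | nil =>
      refine ⟨cur.reverse, acc, by simp [PySem.Chars.splitOn.go], ?_⟩
      simpa using h
    | cons c rest =>
      by_cases hp : sep.isPrefixOf (c :: rest) = true
      · have h' : ([] : List Char).reverse ++ (c :: rest).drop sep.length <:+ s := by
          simp only [List.reverse_nil, List.nil_append]
          exact ((c :: rest).drop_suffix sep.length).trans ((List.suffix_append _ _).trans h)
        obtain ⟨p, acc', heq, hps⟩ := ih ((c :: rest).drop sep.length) [] (cur.reverse :: acc) s h'
        exact ⟨p, acc', by simp [PySem.Chars.splitOn.go, hp]; simpa using heq, hps⟩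
      · have h' : (c :: cur).reverse ++ rest <:+ s := by
          simpa [List.append_assoc] using h
        obtain ⟨p, acc', heq, hps⟩ := ih rest (c :: cur) acc s h'
        exact ⟨p, acc', by simp [PySem.Chars.splitOn.go, hp]; simpa using heq, hps⟩

-- the last piece of a split is a suffix of the split string
theorem pv_splitOn_getLast_suffix (s sep : List Char) :
    ((PySem.Chars.splitOn s sep).getLast?.getD []) <:+ s := by
  obtain ⟨p, acc', heq, hps⟩ := pv_go_spec sep (s.length + 1) s [] [] s (by simp)
  unfold PySem.Chars.splitOn
  rw [heq, List.getLast?_reverse]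
  simpa using hps

theorem pv_pyGet_neg_one {α : Type} (xs : List α) : PySem.List.pyGet? xs (-1) = xs.getLast? := by
  cases xs with
  | nil => rfl
  | cons a l =>
    simp only [PySem.List.pyGet?, PySem.List.pyIdx?]
    norm_num
    rw [List.getLast?_eq_getElem?]
    simp

-- bridge: pySplitLast computes the last piece of Chars.splitOn
theorem pv_pySplitLast_toList (s sep : String) (h : sep.toList ≠ []) :
    (pySplitLast s sep).toList = (PySem.Chars.splitOn s.toList sep.toList).getLast?.getD [] := by
  have hmap := PySem.Str.split?_map s sep
  rw [show PySem.Chars.split? s.toList sep.toList = some (PySem.Chars.splitOn s.toList sep.toList) by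
    simp [PySem.Chars.split?, List.isEmpty_eq_false_iff.mpr h]] at hmap
  obtain ⟨ps, hps, hmap'⟩ : ∃ ps, PySem.Str.split? s sep = some ps ∧
      ps.map String.toList = PySem.Chars.splitOn s.toList sep.toList := by
    cases hx : PySem.Str.split? s sep with
    | none => rw [hx] at hmap; simp at hmap
    | some ps => rw [hx] at hmap; exact ⟨ps, rfl, by simpa using hmap⟩
  rw [pySplitLast, hps, pv_pyGet_neg_one, ← hmap', List.getLast?_map]
  cases h2 : ps.getLast? <;> simp [h2]

theorem pv_pySplitLast_suffix (s sep : String) (h : sep.toList ≠ []) :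
    (pySplitLast s sep).toList <:+ s.toList := by
  rw [pv_pySplitLast_toList s sep h]; exact pv_splitOn_getLast_suffix _ _

-- substring membership is monotone along the suffix order
theorem pv_isIn_mono (t : String) {u v : String} (hs : u.toList <:+ v.toList)
    (hv : PySem.Str.isIn v t = true) : PySem.Str.isIn u t = true := by
  rw [PySem.Str.isIn_iff_infix] at *
  exact List.IsInfix.trans hs.isInfix hv

theorem pv_head?_dropWhile (p : Char → Bool) (l : List Char) (a : Char)
    (h : (l.dropWhile p).head? = some a) : p a = false := by
  cases hdw : l.dropWhile p with
  | nil => rw [hdw] at h; simp at h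
  | cons b t =>
    rw [hdw] at h; simp at h; subst h
    have := List.head_dropWhile_not p (l := l) (by rw [hdw]; simp)
    simpa [hdw] using this

theorem pv_strip_idem_chars (l : List Char) :
    PySem.Chars.strip (PySem.Chars.strip l) = PySem.Chars.strip l := by
  unfold PySem.Chars.strip PySem.Chars.rstrip PySem.Chars.lstrip
  set p := PySem.Chars.isspace with hp
  set u := List.dropWhile p l with hu
  set d := List.dropWhile p u.reverse with hd
  have hu_deco : u = d.reverse ++ (List.takeWhile p u.reverse).reverse := by
    conv_lhs => rw [← List.reverse_reverse u, ← List.takeWhile_append_dropWhile (p := p) (l := u.reverse)]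
    rw [List.reverse_append, hd]
  have h1 : List.dropWhile p d.reverse = d.reverse := by
    cases hdr : d.reverse with
    | nil => simp
    | cons a t =>
      have ha : p a = false := by
        apply pv_head?_dropWhile p l a
        rw [← hu, hu_deco, hdr]
        simp
      simp [ha]
  rw [h1, List.reverse_reverse, List.dropWhile_idempotent]

theorem pv_strip_idem (s : String) : PySem.Str.strip (PySem.Str.strip s) = PySem.Str.strip s := by
  apply String.toList_inj.mp
  rw [PySem.Str.toList_strip, PySem.Str.toList_strip, pv_strip_idem_chars]

theorem pv_any_dedup {α : Type} [DecidableEq α] (l : List α) (p : α → Bool) :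
    (PySem.List.dedup l).any p = l.any p := by
  cases h : l.any p
  · simp only [List.any_eq_false] at *
    intro x hx; exact h x (by simpa [PySem.List.mem_dedup] using hx)
  · simp only [List.any_eq_true] at *
    obtain ⟨x, hx, hpx⟩ := h; exact ⟨x, by simpa [PySem.List.mem_dedup] using hx, hpx⟩

theorem pv_isIn_false_of_suffix (t : String) {u v : String} (hs : u.toList <:+ v.toList)
    (hu : PySem.Str.isIn u t = false) : PySem.Str.isIn v t = false := by
  cases hv : PySem.Str.isIn v t
  · rfl
  · rw [pv_isIn_mono t hs hv] at hu; exact hu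

-- per-symbol core: A's any-over-variants equals B's single test of the shortest variant
theorem pv_key (text sym : String) (h : PySem.Str.strip sym = sym) (hne : ¬ sym = "") :
    (symbolVariants sym).any (fun v => containsSymbol text v) =
      PySem.Str.isIn
        (let probe := if PySem.Str.isIn "." sym then pySplitLast sym "." else sym
         if PySem.Str.isIn "::" sym then
            let t := pySplitLast sym "::"
            if PySem.Str.len t < PySem.Str.len probe then t else probe
          else probe) text := by
  have hdot : (pySplitLast sym ".").toList <:+ sym.toList := pv_pySplitLast_suffix sym "." (by decide)
  have hcol : (pySplitLast sym "::").toList <:+ sym.toList := pv_pySplitLast_suffix sym "::" (by decide)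
  unfold symbolVariants
  rw [h]
  simp only [if_neg hne, pv_any_dedup, containsSymbol]
  by_cases hd : PySem.Str.isIn "." sym = true <;>
    by_cases hc : PySem.Str.isIn "::" sym = true
  · -- both "." and "::" occur in sym; B keeps the shorter of the two tails
    simp only [hd, hc, if_true, List.any_append, List.any_cons, List.any_nil]
    by_cases hlen : PySem.Str.len (pySplitLast sym "::") < PySem.Str.len (pySplitLast sym ".")
    · have hcd : (pySplitLast sym "::").toList <:+ (pySplitLast sym ".").toList := by
        refine List.suffix_of_suffix_length_le hcol hdot ?_
        rw [PySem.Str.len_eq, PySem.Str.len_eq] at hlen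
        omega
      simp only [if_pos hlen]
      cases hp : PySem.Str.isIn (pySplitLast sym "::") text
      · rw [pv_isIn_false_of_suffix text hcd hp, pv_isIn_false_of_suffix text hcol hp]; rfl
      · simp
    · have hdc : (pySplitLast sym ".").toList <:+ (pySplitLast sym "::").toList := by
        refine List.suffix_of_suffix_length_le hdot hcol ?_
        rw [PySem.Str.len_eq, PySem.Str.len_eq] at hlen
        omega
      simp only [if_neg hlen]
      cases hp : PySem.Str.isIn (pySplitLast sym ".") text
      · rw [pv_isIn_false_of_suffix text hdc hp, pv_isIn_false_of_suffix text hdot hp]; rfl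
      · simp
  · -- only "." occurs
    simp only [hd, hc, Bool.false_eq_true, if_true, if_false, List.any_append, List.any_cons, List.any_nil]
    cases hp : PySem.Str.isIn (pySplitLast sym ".") text
    · rw [pv_isIn_false_of_suffix text hdot hp]; rfl
    · simp
  · -- only "::" occurs
    simp only [hd, hc, Bool.false_eq_true, if_true, if_false, List.any_append, List.any_cons, List.any_nil]
    by_cases hlen : PySem.Str.len (pySplitLast sym "::") < PySem.Str.len sym
    · simp only [if_pos hlen]
      cases hp : PySem.Str.isIn (pySplitLast sym "::") text
      · rw [pv_isIn_false_of_suffix text hcol hp]; rfl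
      · simp
    · have heq : pySplitLast sym "::" = sym := by
        apply String.toList_inj.mp
        apply List.IsSuffix.eq_of_length hcol
        rw [PySem.Str.len_eq, PySem.Str.len_eq] at hlen
        have hle := List.IsSuffix.length_le hcol
        omega
      simp only [heq, lt_self_iff_false, if_false]
      cases hp : PySem.Str.isIn sym text
      · rfl
      · simp
  · -- neither occurs
    simp only [hd, hc, Bool.false_eq_true, if_false, List.any_cons, List.any_nil]
    cases hp : PySem.Str.isIn sym text
    · rfl
    · simp

theorem pv_variants_ne_nil (sym : String) (h : PySem.Str.strip sym = sym) (hne : ¬ sym = "") :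
    (symbolVariants sym).isEmpty = false := by
  have hmem : sym ∈ symbolVariants sym := by
    unfold symbolVariants
    rw [h]
    simp only [if_neg hne, PySem.List.mem_dedup]
    split_ifs <;> simp
  rw [List.isEmpty_eq_false_iff]
  exact List.ne_nil_of_mem hmem

theorem pv_step_eq (text : String) (missing : List String) (x : String) :
    (fun missing sym0 =>
      let sym := PySem.Str.strip sym0
      if sym = "" then missing
      else
        let variants := symbolVariants sym
        if variants.isEmpty then missing
        else if variants.any (fun v => containsSymbol text v) then missing
        else missing ++ [sym]) missing x =
    (fun missing raw =>
      let sym := PySem.Str.strip raw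
      if sym = "" then missing
      else
        let probe := if PySem.Str.isIn "." sym then pySplitLast sym "." else sym
        let probe :=
          if PySem.Str.isIn "::" sym then
            let t := pySplitLast sym "::"
            if PySem.Str.len t < PySem.Str.len probe then t else probe
          else probe
        if PySem.Str.isIn probe text then missing else missing ++ [sym]) missing x := by
  show (let sym := PySem.Str.strip x
     if sym = "" then missing
     else
       let variants := symbolVariants sym
       if variants.isEmpty then missing
       else if variants.any (fun v => containsSymbol text v) then missing
       else missing ++ [sym]) = _
  by_cases hx : PySem.Str.strip x = ""
  · simp only [hx, if_true]
  · simp only [if_neg hx, pv_variants_ne_nil (PySem.Str.strip x) (pv_strip_idem x) hx,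
      pv_key text (PySem.Str.strip x) (pv_strip_idem x) hx, Bool.false_eq_true, if_false]

theorem pv_fold_eq (text : String) (symbols : List String) (missing : List String) :
    symbols.foldl (fun missing sym0 =>
      let sym := PySem.Str.strip sym0
      if sym = "" then missing
      else
        let variants := symbolVariants sym
        if variants.isEmpty then missing
        else if variants.any (fun v => containsSymbol text v) then missing
        else missing ++ [sym]) missing =
    symbols.foldl (fun missing raw =>
      let sym := PySem.Str.strip raw
      if sym = "" then missing
      else
        let probe := if PySem.Str.isIn "." sym then pySplitLast sym "." else sym
        let probe :=
          if PySem.Str.isIn "::" sym then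
            let t := pySplitLast sym "::"
            if PySem.Str.len t < PySem.Str.len probe then t else probe
          else probe
        if PySem.Str.isIn probe text then missing else missing ++ [sym]) missing := by
  exact PySem.List.foldl_congr_mem symbols _ _ missing (fun acc x _ => pv_step_eq text acc x)

-- ===== VERDICT (by name: the statement is the Claim_ definition above) =====
theorem validate_symbols_py_spec : Claim_equal_validate_symbols_py := by
  intro text symbols _
  unfold Spec_validate_symbols_py validate_symbols_py validate_symbols_py_alt
  exact pv_fold_eq text symbols []
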